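-- pv_equiv track=rewrite | github.com/brianjdion/chessRater | preprocess.py | extract_moves
-- ===== SOURCE A (Python) =====
-- def extract_moves(pgn_data):
--     lines = pgn_data.split('\n')
--
--     # Find the line containing the moves
--     moves_line = ''
--     for line in lines:
--         if line.startswith('1. '):
--             moves_line = line
--             break
--
--     # Filter out unwanted text and split into individual moves
--     moves = moves_line.split(' ')
--     moves = [move for move in moves if '.' not in move and '{' not in move and '}' not in move]
--
--     # Pair white and black moves
--     paired_moves = [[moves[i], moves[i+1]] for i in range(0, len(moves) - 1, 2)]
--
--     return paired_moves
-- ===== SOURCE B (Python) =====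
-- def extract_moves(pgn_data):
--     # Single accumulator pass: find the moves line with next(), then fuse
--     # filtering and pairing into one loop carrying the unpaired white move.
--     moves_line = next((line for line in pgn_data.split('\n')
--                        if line.startswith('1. ')), '')
--     paired = []
--     pending = None
--     for tok in moves_line.split(' '):
--         if '.' in tok or '{' in tok or '}' in tok:
--             continue
--         if pending is None:
--             pending = tok
--         else:
--             paired.append([pending, tok])
--             pending = None
--     return paired
-- ===== Notes on version B (the rewrite author's own statement) =====
-- stated objective: simpler
-- what changed: Replaces the filter comprehension plus index-arithmetic pairing comprehension (range(0, len-1, 2) with subscripting) by a single pass over the tokens that skips annotations and pairs moves via one held-move accumulator variable, and uses next() for the moves-line search.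
import Mathlib
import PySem

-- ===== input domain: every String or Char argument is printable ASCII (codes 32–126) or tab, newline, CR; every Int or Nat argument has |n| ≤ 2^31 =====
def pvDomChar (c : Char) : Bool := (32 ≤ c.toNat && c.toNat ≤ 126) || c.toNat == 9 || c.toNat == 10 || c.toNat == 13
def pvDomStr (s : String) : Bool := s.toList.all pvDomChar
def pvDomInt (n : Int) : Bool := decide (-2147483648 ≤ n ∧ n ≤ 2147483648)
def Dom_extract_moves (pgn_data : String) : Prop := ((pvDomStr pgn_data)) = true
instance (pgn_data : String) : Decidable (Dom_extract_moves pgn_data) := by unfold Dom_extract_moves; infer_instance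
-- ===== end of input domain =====

-- B replaces the filter-then-index-pair comprehensions by one fused pass with a held-move
-- accumulator (and next() for the moves-line search); same cost, simpler decomposition.


-- ===== PORT A =====
-- 'for line in lines: if line.startswith("1. "): moves_line = line; break' (moves_line = '' if none)
def extract_moves_findLine : List String → String
  | [] => ""
  | l :: rest => if PySem.Str.startswith l "1. " then l else extract_moves_findLine rest

def extract_moves (pgn_data : String) : List (List String) :=
  let lines := (PySem.Str.split? pgn_data "\n").getD []        -- sep ≠ "", so split? is some: exact
  let moves_line := extract_moves_findLine lines
  let moves := (PySem.Str.split? moves_line " ").getD []       -- sep ≠ "": exact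
  let moves := moves.filter (fun m => !(PySem.Str.isIn "." m) && !(PySem.Str.isIn "{" m) && !(PySem.Str.isIn "}" m))
  (PySem.List.pyRange 0 ((moves.length : Int) - 1) 2).map
    (fun i => [PySem.List.pyGetD moves i "", PySem.List.pyGetD moves (i + 1) ""])
  -- indices from range(0, len-1, 2) are always in bounds, so pyGetD's default is never used

-- ===== PORT B =====
def extract_moves_pairLoop : List String → List (List String) → Option String → List (List String)
  | [], paired, _ => paired
  | tok :: rest, paired, pending =>
    if PySem.Str.isIn "." tok || PySem.Str.isIn "{" tok || PySem.Str.isIn "}" tok then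
      extract_moves_pairLoop rest paired pending
    else
      match pending with
      | none => extract_moves_pairLoop rest paired (some tok)
      | some p => extract_moves_pairLoop rest (paired ++ [[p, tok]]) none

def extract_moves_alt (pgn_data : String) : List (List String) :=
  let moves_line := ((((PySem.Str.split? pgn_data "\n").getD []).find?
      (fun line => PySem.Str.startswith line "1. ")).getD "")
  extract_moves_pairLoop ((PySem.Str.split? moves_line " ").getD []) [] none

-- ===== PRECONDITION & SPEC =====
def Spec_extract_moves (pgn_data : String) (out : List (List String)) : Prop := out = extract_moves_alt pgn_data
instance (pgn_data : String) (out : List (List String)) : Decidable (Spec_extract_moves pgn_data out) := by unfold Spec_extract_moves; infer_instance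

-- ===== CLAIM (what is proved, stated in full; the proofs are below) =====
def Claim_equal_extract_moves : Prop := ∀ (pgn_data : String), Dom_extract_moves pgn_data → Spec_extract_moves pgn_data (extract_moves pgn_data)

-- ===== LEMMAS AND PROOFS =====

def pvKeep (m : String) : Bool :=
  !(PySem.Str.isIn "." m) && !(PySem.Str.isIn "{" m) && !(PySem.Str.isIn "}" m)

-- canonical pairing of an (already filtered) move list, dropping an odd last element
def pvPairs : List String → List (List String)
  | a :: b :: rest => [a, b] :: pvPairs rest
  | _ => []

theorem findLine_eq (lines : List String) :
    extract_moves_findLine lines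
      = ((lines.find? (fun line => PySem.Str.startswith line "1. ")).getD "") := by
  induction lines with
  | nil => rfl
  | cons l rest ih =>
    rw [extract_moves_findLine]
    cases h : PySem.Str.startswith l "1. " with
    | false =>
      have h' : PySem.Chars.startswith l.toList ['1', '.', ' '] = false := h
      simp [h', ih]
    | true =>
      have h' : PySem.Chars.startswith l.toList ['1', '.', ' '] = true := h
      simp [h']

theorem pvKeep_eq (t : String) :
    pvKeep t = !(PySem.Str.isIn "." t || PySem.Str.isIn "{" t || PySem.Str.isIn "}" t) := by
  unfold pvKeep
  cases PySem.Str.isIn "." t <;> cases PySem.Str.isIn "{" t <;> cases PySem.Str.isIn "}" t <;> rfl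

theorem pairLoop_eq (toks : List String) (acc : List (List String)) (pending : Option String) :
    extract_moves_pairLoop toks acc pending
      = acc ++ pvPairs (pending.toList ++ toks.filter pvKeep) := by
  induction toks generalizing acc pending with
  | nil => cases pending <;> simp [extract_moves_pairLoop, pvPairs]
  | cons t rest ih =>
    by_cases h : (PySem.Str.isIn "." t || PySem.Str.isIn "{" t || PySem.Str.isIn "}" t) = true
    · have hk : pvKeep t = false := by rw [pvKeep_eq, h]; rfl
      rw [List.filter_cons_of_neg (by simp [hk])]
      simp only [extract_moves_pairLoop, if_pos h]
      exact ih acc pending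
    · have hk : pvKeep t = true := by rw [pvKeep_eq, eq_false_of_ne_true h]; rfl
      rw [List.filter_cons_of_pos hk]
      cases pending with
      | none =>
        simp only [extract_moves_pairLoop, if_neg h]
        simpa using ih acc (some t)
      | some p =>
        simp only [extract_moves_pairLoop, if_neg h]
        rw [ih (acc ++ [[p, t]]) none]
        simp [pvPairs]

theorem pyRange_two_cons {a b : Int} (h : a < b) :
    PySem.List.pyRange a b 2 = a :: PySem.List.pyRange (a + 2) b 2 := by
  rw [PySem.List.pyRange_of_pos _ _ (by norm_num), PySem.List.pyRange_of_pos _ _ (by norm_num)]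
  have h1 : (if a < b then ((b - a + 2 - 1) / 2).toNat else 0)
      = (if a + 2 < b then ((b - (a + 2) + 2 - 1) / 2).toNat else 0) + 1 := by
    split_ifs <;> omega
  rw [h1, List.range_succ_eq_map, List.map_cons, List.map_map]
  refine congrArg₂ _ (by ring) ?_
  refine List.map_congr_left fun k _ => ?_
  simp only [Function.comp_apply]; push_cast; ring

theorem pyRange_two_shift (b : Int) :
    PySem.List.pyRange 2 (b + 2) 2 = (PySem.List.pyRange 0 b 2).map (· + 2) := by
  rw [PySem.List.pyRange_of_pos _ _ (by norm_num : (0:Int) < 2),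
      PySem.List.pyRange_of_pos _ _ (by norm_num : (0:Int) < 2), List.map_map]
  have h1 : (if (2:Int) < b + 2 then ((b + 2 - 2 + 2 - 1) / 2).toNat else 0)
      = (if (0:Int) < b then ((b - 0 + 2 - 1) / 2).toNat else 0) := by
    split_ifs <;> omega
  rw [h1]
  exact List.map_congr_left fun k _ => by simp [Function.comp]; ring

theorem pairsA_eq (ms : List String) :
    (PySem.List.pyRange 0 ((ms.length : Int) - 1) 2).map
        (fun i => [PySem.List.pyGetD ms i "", PySem.List.pyGetD ms (i + 1) ""])
      = pvPairs ms := by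
  match ms with
  | [] =>
    rw [PySem.List.pyRange_of_pos _ _ (by norm_num : (0:Int) < 2)]
    simp [pvPairs]
  | [a] =>
    rw [PySem.List.pyRange_of_pos _ _ (by norm_num : (0:Int) < 2)]
    simp [pvPairs]
  | a :: b :: rest =>
    have hlen : ((a :: b :: rest).length : Int) - 1 = (rest.length : Int) + 1 := by
      simp
    rw [hlen, pyRange_two_cons (by positivity)]
    simp only [zero_add]
    rw [
        (by omega : ((rest.length : Int) + 1) = ((rest.length : Int) - 1) + 2),
        pyRange_two_shift, List.map_cons, List.map_map]
    have hhd : [PySem.List.pyGetD (a :: b :: rest) 0 "", PySem.List.pyGetD (a :: b :: rest) (0 + 1) ""]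
        = [a, b] := by
      simp [PySem.List.pyGetD_ofNat' (a :: b :: rest) 0 "", PySem.List.pyGetD_ofNat' (a :: b :: rest) 1 ""]
    have htl : ∀ k ∈ PySem.List.pyRange 0 ((rest.length : Int) - 1) 2,
        [PySem.List.pyGetD (a :: b :: rest) (k + 2) "", PySem.List.pyGetD (a :: b :: rest) (k + 2 + 1) ""]
          = [PySem.List.pyGetD rest k "", PySem.List.pyGetD rest (k + 1) ""] := by
      intro k hk
      have hk0 : 0 ≤ k := ((PySem.List.mem_pyRange_iff_of_pos (by norm_num) k).mp hk).1
      rw [PySem.List.pyGetD_of_nonneg _ _ (by omega), PySem.List.pyGetD_of_nonneg _ _ (by omega),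
          PySem.List.pyGetD_of_nonneg _ _ hk0, PySem.List.pyGetD_of_nonneg _ _ (by omega),
          (by omega : (k + 2).toNat = k.toNat + 2), (by omega : (k + 2 + 1).toNat = (k + 1).toNat + 2)]
      simp [List.getD]
    rw [hhd, List.map_congr_left (fun k hk => by simp only [Function.comp_apply]; exact htl k hk), pairsA_eq rest]
    rfl

-- ===== VERDICT (by name: the statement is the Claim_ definition above) =====
theorem extract_moves_spec : Claim_equal_extract_moves := by
  intro pgn_data _
  unfold Spec_extract_moves extract_moves extract_moves_alt
  simp only [findLine_eq, pairLoop_eq, pairsA_eq, Option.toList_none, List.nil_append]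
  rfl
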